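-- pv_equiv track=rewrite | github.com/mikeKharisma28/dynamo-to-cfn | dynamo_to_cfn.py | make_logical_name
-- ===== SOURCE A (Python) =====
-- def make_logical_name(table_name: str) -> str:
--     if not table_name:
--         return "DynamoDBTable"
--     cleaned = "".join(ch if ch.isalnum() else "_" for ch in table_name)
--     if not cleaned[0].isalpha():
--         cleaned = "T_" + cleaned
--     parts = [p for p in cleaned.split("_") if p]
--     return "".join(p.capitalize() for p in parts)[:255]
-- ===== SOURCE B (Python) =====
-- def make_logical_name(table_name: str) -> str:
--     # Single left-to-right pass: flush alphanumeric runs as capitalized words.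
--     if not table_name:
--         return "DynamoDBTable"
--     words = []
--     if not table_name[0].isalpha():
--         words.append("T")
--     buf = []
--     for ch in table_name:
--         if ch.isalnum():
--             buf.append(ch)
--         else:
--             if buf:
--                 words.append("".join(buf).capitalize())
--                 buf = []
--     if buf:
--         words.append("".join(buf).capitalize())
--     return "".join(words)[:255]
-- ===== Notes on version B (the rewrite author's own statement) =====
-- stated objective: alternative
-- what changed: Replaces A's three-pass pipeline (map non-alnum to '_', prepend 'T_', split on '_' and filter, capitalize-join) by a single left-to-right pass that accumulates alphanumeric runs in a buffer and flushes each as a capitalized word, emitting a leading 'T' word when the first char is not a letter.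
import Mathlib
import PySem

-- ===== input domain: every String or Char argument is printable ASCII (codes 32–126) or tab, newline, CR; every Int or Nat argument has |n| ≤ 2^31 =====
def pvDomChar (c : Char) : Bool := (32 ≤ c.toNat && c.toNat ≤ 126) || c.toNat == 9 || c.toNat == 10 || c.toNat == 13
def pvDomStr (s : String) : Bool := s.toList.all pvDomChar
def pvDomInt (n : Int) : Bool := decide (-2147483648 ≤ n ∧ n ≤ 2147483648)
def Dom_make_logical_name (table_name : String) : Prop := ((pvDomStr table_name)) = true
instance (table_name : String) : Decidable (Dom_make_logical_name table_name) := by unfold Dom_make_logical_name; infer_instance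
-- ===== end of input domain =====

-- B: one left-to-right pass flushing alphanumeric runs as capitalized words (alternative decomposition; same cost).

-- ===== PORT A =====
-- ch if ch.isalnum() else "_"
def pvClean (ch : Char) : Char := if PySem.Chars.isalnum ch then ch else '_'

-- str.capitalize(): first char uppercased, rest lowercased (exact on ASCII); shared by both ports
def pvCap (p : List Char) : List Char :=
  match p with
  | [] => []
  | c :: cs => PySem.Chars.upperChar c :: cs.map PySem.Chars.lowerChar

-- hand port of str.split("_") for the one-character separator "_": exact (keeps empty pieces, result never empty)
def pvSplitUnd (cs : List Char) : List (List Char) :=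
  match cs with
  | [] => [[]]
  | c :: rest =>
    if c = '_' then [] :: pvSplitUnd rest
    else
      match pvSplitUnd rest with
      | p :: ps => (c :: p) :: ps
      | [] => [[c]]   -- unreachable: pvSplitUnd never returns []

def make_logical_name (table_name : String) : String :=
  match table_name.toList with
  | [] => "DynamoDBTable"            -- if not table_name
  | c :: rest =>
    let cleaned := (c :: rest).map pvClean
    -- cleaned[0] is safe: cleaned is nonempty here
    let cleaned2 := if !(PySem.Chars.isalpha (cleaned.headD ' ')) then 'T' :: '_' :: cleaned else cleaned
    let parts := (pvSplitUnd cleaned2).filter (fun p => !p.isEmpty)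
    String.ofList (PySem.List.slice ((parts.map pvCap).flatten) none (some 255))   -- "".join(...)[:255]

-- ===== PORT B =====
-- the for-loop of B: `buf` holds the current run (reversed, as it is built by cons);
-- flushing appends words in order, so the loop is the obvious structural recursion emitting words
def pvRunsB (buf : List Char) (cs : List Char) : List (List Char) :=
  match cs with
  | [] => if buf.isEmpty then [] else [pvCap buf.reverse]
  | c :: rest =>
    if PySem.Chars.isalnum c then pvRunsB (c :: buf) rest
    else if buf.isEmpty then pvRunsB [] rest
    else pvCap buf.reverse :: pvRunsB [] rest

def make_logical_name_alt (table_name : String) : String :=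
  match table_name.toList with
  | [] => "DynamoDBTable"
  | c :: rest =>
    let words : List (List Char) := if !(PySem.Chars.isalpha c) then [['T']] else []
    String.ofList (((words ++ pvRunsB [] (c :: rest)).flatten).take 255)

-- ===== PRECONDITION & SPEC =====
def Spec_make_logical_name (table_name : String) (out : String) : Prop := out = make_logical_name_alt table_name
instance (table_name : String) (out : String) : Decidable (Spec_make_logical_name table_name out) := by unfold Spec_make_logical_name; infer_instance

-- ===== CLAIM (what is proved, stated in full; the proofs are below) =====
def Claim_equal_make_logical_name : Prop := ∀ (table_name : String), Dom_make_logical_name table_name → Spec_make_logical_name table_name (make_logical_name table_name)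

-- ===== LEMMAS AND PROOFS =====

theorem pvClean_ne_und {c : Char} (h : PySem.Chars.isalnum c = true) : pvClean c ≠ '_' := by
  simp only [pvClean, h, if_true]
  intro hc
  rw [hc] at h
  exact absurd h (by decide)

theorem pvClean_und {c : Char} (h : PySem.Chars.isalnum c = false) : pvClean c = '_' := by
  simp [pvClean, h]

theorem pvSplitUnd_ne_nil (cs : List Char) : pvSplitUnd cs ≠ [] := by
  cases cs with
  | nil => simp [pvSplitUnd]
  | cons c rest =>
    simp only [pvSplitUnd]
    split
    · simp
    · cases h : pvSplitUnd rest <;> simp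

-- the loop invariant: with alnum run `buf` pending, the loop computes the words of
-- `buf.reverse ++ cleaned suffix`, i.e. the filtered split with `buf.reverse` glued onto the head piece
theorem pvRunsB_invariant (s : List Char) : ∀ (buf : List Char),
    pvRunsB buf s
      = (((pvSplitUnd (s.map pvClean)).modifyHead (fun p => buf.reverse ++ p)).filter
          (fun p => !p.isEmpty)).map pvCap := by
  induction s with
  | nil =>
    intro buf
    simp only [pvRunsB, List.map_nil, pvSplitUnd, List.modifyHead, List.append_nil]
    by_cases hb : buf = []
    · subst hb; simp
    · have h1 : buf.reverse.isEmpty = false := by simp [hb]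
      have h2 : buf.isEmpty = false := by simp [hb]
      simp [List.filter, h1, h2]
  | cons c rest ih =>
    intro buf
    by_cases hc : PySem.Chars.isalnum c = true
    · have hne : pvClean c ≠ '_' := pvClean_ne_und hc
      have hcc : pvClean c = c := by simp [pvClean, hc]
      simp only [pvRunsB, hc, if_true, List.map_cons, pvSplitUnd, hcc]
      rw [ih (c :: buf)]
      have hcu : c ≠ '_' := by rw [← hcc]; exact hne
      cases h : pvSplitUnd (rest.map pvClean) with
      | nil => exact absurd h (pvSplitUnd_ne_nil _)
      | cons p ps =>
        simp [hcu]
    · have hcf : PySem.Chars.isalnum c = false := by simpa using hc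
      have hcc : pvClean c = '_' := pvClean_und hcf
      simp only [pvRunsB, hcf, List.map_cons, pvSplitUnd, hcc, if_true, List.modifyHead,
        Bool.false_eq_true, if_false]
      by_cases hb : buf = []
      · subst hb
        rw [ih []]
        cases h : pvSplitUnd (rest.map pvClean) with
        | nil => exact absurd h (pvSplitUnd_ne_nil _)
        | cons p ps => simp [List.filter]
      · have hbne : buf.reverse ≠ [] := by simpa using hb
        have hbe : buf.isEmpty = false := by simp [hb]
        rw [hbe]
        simp only [Bool.false_eq_true, if_false]
        rw [ih []]
        cases h : pvSplitUnd (rest.map pvClean) with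
        | nil => exact absurd h (pvSplitUnd_ne_nil _)
        | cons p ps =>
          simp [hbe]

theorem pvRunsB_nil_buf (s : List Char) :
    pvRunsB [] s
      = ((pvSplitUnd (s.map pvClean)).filter (fun p => !p.isEmpty)).map pvCap := by
  rw [pvRunsB_invariant s []]
  cases h : pvSplitUnd (s.map pvClean) with
  | nil => exact absurd h (pvSplitUnd_ne_nil _)
  | cons p ps => simp

theorem pvIsalpha_clean (c : Char) : PySem.Chars.isalpha (pvClean c) = PySem.Chars.isalpha c := by
  by_cases h : PySem.Chars.isalnum c = true
  · simp [pvClean, h]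
  · have hf : PySem.Chars.isalnum c = false := by simpa using h
    have : PySem.Chars.isalpha c = false := by
      have := hf
      simp only [PySem.Chars.isalnum, Bool.or_eq_false_iff] at this
      exact this.1
    simp [pvClean, hf, this]
    decide

-- ===== VERDICT (by name: the statement is the Claim_ definition above) =====
theorem make_logical_name_spec : Claim_equal_make_logical_name := by
  intro table_name _
  show make_logical_name table_name = make_logical_name_alt table_name
  unfold make_logical_name make_logical_name_alt
  cases hs : table_name.toList with
  | nil => rfl
  | cons c rest =>
    simp only [PySem.List.slice_to _ (by norm_num : (0:Int) ≤ 255),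
      show ((255:Int).toNat = 255) from rfl]
    have hhead : ((c :: rest).map pvClean).headD ' ' = pvClean c := by simp
    rw [hhead, pvIsalpha_clean]
    by_cases ha : PySem.Chars.isalpha c = true
    · simp only [ha, Bool.not_true, Bool.false_eq_true, if_false]
      rw [pvRunsB_nil_buf]
      simp
    · have haf : PySem.Chars.isalpha c = false := by simpa using ha
      simp only [haf, Bool.not_false, if_true]
      have hT : pvSplitUnd ('T' :: '_' :: (c :: rest).map pvClean)
          = ['T'] :: pvSplitUnd ((c :: rest).map pvClean) := by
        simp only [pvSplitUnd]
        norm_num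
        cases h : pvSplitUnd ((c :: rest).map pvClean) with
        | nil => exact absurd h (pvSplitUnd_ne_nil _)
        | cons p ps => simp
      rw [hT, pvRunsB_nil_buf]
      have hu : pvCap ['T'] = ['T'] := by decide
      simp [List.filter, hu]
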